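-- pv_equiv track=rewrite | github.com/GaspardVCS/AdventOfCode2020 | day21.py | products_allergens
-- ===== SOURCE A (Python) =====
-- def products_allergens(products):
--     new_dict = {}
--     n = len(products)
--     for _ in range(n):
--         for p in products:
--             if len(products[p]) == 1:
--                 position = products[p][0]
--                 new_dict[p] = position
--                 for c in products:
--                     if position in products[c]:
--                         products[c].remove(position)
--                 del products[p]
--                 break
--     return new_dict
-- ===== SOURCE B (Python) =====
-- def products_allergens(products):
--     # Worklist variant: maintain the set of current single-candidate keys
--     # incrementally instead of rescanning all products each round.
--     # (Return-value equivalent to the original; unlike it, does not mutate `products`.)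
--     remaining = {p: list(v) for p, v in products.items()}
--     order = {p: i for i, p in enumerate(products)}
--     candidates = {p for p, v in remaining.items() if len(v) == 1}
--     result = {}
--     while candidates:
--         p = min(candidates, key=order.__getitem__)
--         candidates.remove(p)
--         if len(remaining[p]) != 1:
--             continue  # became empty after its position was claimed elsewhere
--         pos = remaining[p][0]
--         result[p] = pos
--         del remaining[p]
--         for c in remaining:
--             lst = remaining[c]
--             if pos in lst:
--                 lst.remove(pos)
--                 if len(lst) == 1:
--                     candidates.add(c)
--     return result
-- ===== Notes on version B (the rewrite author's own statement) =====
-- stated objective: faster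
-- what changed: Replaces A's fixed n rounds of rescanning every product for a singleton list by a worklist: the set of current single-candidate keys is maintained incrementally during removals and the next key to resolve is taken as the minimum-index candidate, so rounds that would scan everything and find nothing disappear; B also does not mutate the input dict (A empties it in place).
import Mathlib
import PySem

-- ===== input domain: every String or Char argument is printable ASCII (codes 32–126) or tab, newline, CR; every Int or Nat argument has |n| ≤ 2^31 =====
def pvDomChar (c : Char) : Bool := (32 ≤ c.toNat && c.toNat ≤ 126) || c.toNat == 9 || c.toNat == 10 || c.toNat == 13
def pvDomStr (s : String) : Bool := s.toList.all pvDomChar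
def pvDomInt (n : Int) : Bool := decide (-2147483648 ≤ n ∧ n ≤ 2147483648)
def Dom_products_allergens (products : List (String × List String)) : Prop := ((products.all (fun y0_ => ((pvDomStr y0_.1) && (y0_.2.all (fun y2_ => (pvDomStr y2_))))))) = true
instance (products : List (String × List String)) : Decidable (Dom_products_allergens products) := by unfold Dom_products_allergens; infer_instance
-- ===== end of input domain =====

-- B replaces A's per-round rescan of all products by an incrementally maintained
-- set of single-candidate keys (a worklist); return values are identical.
-- NOTE: the Python A mutates its dict argument in place (deletes keys, empties lists);
-- B does not. The equivalence proved here is about the RETURN value only.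

-- ===== PORT A =====
-- inner loop 'for c in products: if position in products[c]: products[c].remove(position)'
def pvARemove (pos : String) (d : PySem.Dict String (List String)) (c : String) :
    PySem.Dict String (List String) :=
  if pos ∈ d.getD c [] then
    d.insert c ((PySem.List.remove? (d.getD c []) pos).getD (d.getD c []))
  else d

-- 'for p in products: if len(products[p]) == 1: … break' (p always a key, so getD's default is never read)
def pvAScan (d : PySem.Dict String (List String)) (nd : PySem.Dict String String) :
    List String → PySem.Dict String (List String) × PySem.Dict String String
  | [] => (d, nd)
  | p :: rest =>
    if (d.getD p []).length == 1 then
      let pos := PySem.List.pyGetD (d.getD p []) 0 ""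
      ((d.keys.foldl (pvARemove pos) d).erase p, nd.insert p pos)
    else pvAScan d nd rest

def products_allergens (products : List (String × List String)) : List (String × String) :=
  let d0 := PySem.Dict.ofList products
  let st := (PySem.List.pyRange 0 (d0.size : Int) 1).foldl
      (fun st _ => pvAScan st.1 st.2 st.1.keys) (d0, (PySem.Dict.empty : PySem.Dict String String))
  st.2.items

-- ===== PORT B =====
-- body of 'for c in remaining: …' — removes pos from c's list and records new singletons
def pvBStep (pos : String) (st : PySem.Dict String (List String) × PySem.Set String) (c : String) :
    PySem.Dict String (List String) × PySem.Set String :=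
  let lst := st.1.getD c []
  if pos ∈ lst then
    let lst' := (PySem.List.remove? lst pos).getD lst
    (st.1.insert c lst', if lst'.length == 1 then PySem.Set.add st.2 c else st.2)
  else st

-- termination helpers for the while-loop (cited by decreasing_by)
theorem pvContains_of_getD_ne_nil {d : PySem.Dict String (List String)} {c : String}
    (h : d.getD c [] ≠ []) : d.contains c = true := by
  rw [PySem.Dict.contains_eq_isSome_get?]
  cases hg : d.get? c with
  | none => exact absurd (by simp [PySem.Dict.getD_eq_get?_getD, hg]) h
  | some v => simp

theorem pvBStep_size (pos : String) (st : PySem.Dict String (List String) × PySem.Set String)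
    (c : String) : (pvBStep pos st c).1.size = st.1.size := by
  unfold pvBStep
  simp only []
  split
  · rename_i hmem
    have hc : st.1.contains c = true :=
      pvContains_of_getD_ne_nil (by intro h; rw [h] at hmem; simp at hmem)
    simp [PySem.Dict.size_insert, hc]
  · rfl

theorem pvBFold_size (pos : String) :
    ∀ (ks : List String) (st : PySem.Dict String (List String) × PySem.Set String),
      ((ks.foldl (pvBStep pos) st).1).size = st.1.size := by
  intro ks
  induction ks with
  | nil => intro st; rfl
  | cons c rest ih => intro st; rw [List.foldl_cons, ih, pvBStep_size]

theorem pvErase_size_lt {d : PySem.Dict String (List String)} {p : String}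
    (h : d.contains p = true) : (d.erase p).size < d.size := by
  rw [PySem.Dict.contains_eq_isSome_get?] at h
  cases hg : d.get? p with
  | none => rw [hg] at h; simp at h
  | some v =>
    have hmem : (p, v) ∈ d.items := PySem.Dict.mem_items_of_get?_eq_some d hg
    have hex : ∃ x ∈ d.items, ¬ (fun e : String × List String => !e.1 == p) x = true :=
      ⟨(p, v), hmem, by simp⟩
    exact List.length_filter_lt_length_iff_exists.mpr hex

theorem pvDiscard_length_lt {s : PySem.Set String} {p : String} (h : p ∈ s) :
    (PySem.Set.discard s p).length < s.length := by
  have hex : ∃ x ∈ s, ¬ (fun y => !y == p) x = true := ⟨p, h, by simp⟩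
  exact List.length_filter_lt_length_iff_exists.mpr hex

-- the while loop: pop the minimal-index candidate, skip stale ones, process singletons
def pvBLoop (order : PySem.Dict String Int) (remaining : PySem.Dict String (List String))
    (cand : PySem.Set String) (res : PySem.Dict String String) : PySem.Dict String String :=
  match hmin : PySem.List.min? cand (fun p => order.getD p 0) with
  | none => res
  | some p =>
    -- candidates.remove(p): p was just returned by min, so it is present
    let cand1 := (PySem.Set.remove? cand p).getD cand
    if hlen : (remaining.getD p []).length ≠ 1 then
      pvBLoop order remaining cand1 res
    else
      let pos := PySem.List.pyGetD (remaining.getD p []) 0 ""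
      let rem1 := remaining.erase p
      let st := rem1.keys.foldl (pvBStep pos) (rem1, cand1)
      pvBLoop order st.1 st.2 (res.insert p pos)
termination_by (remaining.size, cand.length)
decreasing_by
  · apply Prod.Lex.right
    have hp : p ∈ cand := PySem.List.min?_mem hmin
    have hrem : (PySem.Set.remove? cand p) = some (PySem.Set.discard cand p) := by
      unfold PySem.Set.remove?
      rw [if_pos ((PySem.Set.contains_iff cand p).2 hp)]
    simp only [hrem, Option.getD_some]
    exact pvDiscard_length_lt hp
  · apply Prod.Lex.left
    have h1 : st.1.size = rem1.size := pvBFold_size pos rem1.keys (rem1, cand1)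
    have hc : remaining.contains p = true := by
      apply pvContains_of_getD_ne_nil
      intro h
      rw [h] at hlen; simp at hlen
    rw [h1]
    exact pvErase_size_lt hc

def products_allergens_alt (products : List (String × List String)) : List (String × String) :=
  let remaining := PySem.Dict.ofList products
  -- order = {p: i for i, p in enumerate(products)}; candidate keys are always present,
  -- so the lookup order[p] never raises and getD's default is never read
  let order := (PySem.List.enumerate remaining.keys 0).foldl
      (fun od pr => od.insert pr.2 pr.1) (PySem.Dict.empty : PySem.Dict String Int)
  let candidates := PySem.Set.ofList ((remaining.items.filter (fun kv => kv.2.length == 1)).map (·.1))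
  (pvBLoop order remaining candidates PySem.Dict.empty).items

-- ===== PRECONDITION & SPEC =====
def Spec_products_allergens (products : List (String × List String)) (out : List (String × String)) : Prop := out = products_allergens_alt products
instance (products : List (String × List String)) (out : List (String × String)) : Decidable (Spec_products_allergens products out) := by unfold Spec_products_allergens; infer_instance

-- ===== CLAIM (what is proved, stated in full; the proofs are below) =====
def Claim_equal_products_allergens : Prop := ∀ (products : List (String × List String)), Dom_products_allergens products → Spec_products_allergens products (products_allergens products)

-- ===== LEMMAS AND PROOFS =====

-- ======== proof-only helpers ========
def pvG (pos : String) (ks : List String) (e : String × List String) : String × List String :=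
  if e.1 ∈ ks ∧ pos ∈ e.2 then (e.1, e.2.erase pos) else e

def pvRound (st : PySem.Dict String (List String) × PySem.Dict String String) :
    PySem.Dict String (List String) × PySem.Dict String String :=
  pvAScan st.1 st.2 st.1.keys

def pvOrdD (K : List String) : PySem.Dict String Int :=
  (PySem.List.enumerate K 0).foldl (fun od pr => od.insert pr.2 pr.1) PySem.Dict.empty

def pvINV (K : List String) (d : PySem.Dict String (List String)) (cand : PySem.Set String) : Prop :=
  d.keys.Nodup ∧ d.keys.Sublist K ∧ cand.Nodup ∧
  (∀ x ∈ cand, x ∈ d.keys ∧ (d.getD x []).length ≤ 1) ∧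
  (∀ x ∈ d.keys, (d.getD x []).length = 1 → x ∈ cand)

-- pvG preserves the key of an entry
theorem pvG_fst (pos : String) (ks : List String) (e : String × List String) :
    (pvG pos ks e).1 = e.1 := by
  unfold pvG; split <;> rfl

theorem pvG_comp (pos : String) (c : String) (ks : List String) (hc : c ∉ ks) :
    (pvG pos ks) ∘ (pvG pos [c]) = pvG pos (c :: ks) := by
  funext e
  unfold pvG
  by_cases h1 : e.1 = c
  · by_cases h2 : pos ∈ e.2
    · simp [h1, h2, hc]
    · simp [h1, h2, hc]
  · simp [h1]
-- get? through a pvG-mapped items list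
theorem pvGet?_map_pvG (pos : String) (ks : List String)
    (d d' : PySem.Dict String (List String)) (h : d'.items = d.items.map (pvG pos ks)) (x : String) :
    d'.get? x = (d.get? x).map (fun v => if x ∈ ks ∧ pos ∈ v then v.erase pos else v) := by
  unfold PySem.Dict.get?
  rw [h, List.find?_map]
  have hpred : ((fun p : String × List String => p.1 == x) ∘ (pvG pos ks)) =
      (fun p : String × List String => p.1 == x) := by
    funext e; simp [Function.comp, pvG_fst]
  rw [hpred]
  cases hf : d.items.find? (fun p => p.1 == x) with
  | none => rfl
  | some e =>
    have he : e.1 = x := by simpa using List.find?_some hf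
    simp only [Option.map_some]
    unfold pvG
    rw [he]
    split <;> simp_all

theorem pvKeys_map_pvG (pos : String) (ks : List String)
    (d d' : PySem.Dict String (List String)) (h : d'.items = d.items.map (pvG pos ks)) :
    d'.keys = d.keys := by
  unfold PySem.Dict.keys
  rw [h, List.map_map]
  apply List.map_congr_left
  intro e _
  exact pvG_fst pos ks e

theorem pvGetD_eq_of_mem_items {d : PySem.Dict String (List String)} {k : String} {v : List String}
    (h : (k, v) ∈ d.items) (hN : d.keys.Nodup) : d.getD k [] = v :=
  PySem.Dict.getD_of_mem_items d h hN []

theorem pvMem_keys_getD {d : PySem.Dict String (List String)} {x : String}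
    (hN : d.keys.Nodup) (hx : x ∈ d.keys) : (x, d.getD x []) ∈ d.items := by
  unfold PySem.Dict.keys at hx
  obtain ⟨e, he, hex⟩ := List.mem_map.1 hx
  have : d.getD e.1 [] = e.2 := pvGetD_eq_of_mem_items (by simpa using he) hN
  rw [← hex, this]
  simpa using he

-- the single removal step is a map over items
theorem pvARemove_items (pos : String) (d : PySem.Dict String (List String)) (c : String)
    (hN : d.keys.Nodup) : (pvARemove pos d c).items = d.items.map (pvG pos [c]) := by
  unfold pvARemove
  split
  · rename_i hm
    have hc : d.contains c = true :=
      pvContains_of_getD_ne_nil (by intro h0; rw [h0] at hm; simp at hm)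
    rw [PySem.List.remove?_eq_some_erase _ _ hm, Option.getD_some,
        PySem.Dict.items_insert_of_contains d _ hc]
    apply List.map_congr_left
    intro e he
    by_cases h1 : e.1 = c
    · have hval : d.getD e.1 [] = e.2 := pvGetD_eq_of_mem_items (by simpa using he) hN
      rw [h1] at hval
      unfold pvG
      simp only [h1, List.mem_singleton, beq_self_eq_true, if_true, true_and]
      rw [if_pos (hval ▸ hm), ← hval]
    · unfold pvG
      simp [h1]
  · rename_i hm
    conv_lhs => rw [← List.map_id d.items]
    apply List.map_congr_left
    intro e he
    unfold pvG
    by_cases h1 : e.1 = c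
    · have hval : d.getD e.1 [] = e.2 := pvGetD_eq_of_mem_items (by simpa using he) hN
      rw [h1] at hval
      simp [h1, hval ▸ hm]
    · simp [h1]

theorem pvBStep_fst (pos : String) (st : PySem.Dict String (List String) × PySem.Set String)
    (c : String) : (pvBStep pos st c).1 = pvARemove pos st.1 c := by
  unfold pvBStep pvARemove
  by_cases hm : pos ∈ st.1.getD c [] <;> simp [hm]

theorem pvBStep_items (pos : String) (st : PySem.Dict String (List String) × PySem.Set String)
    (c : String) (hN : st.1.keys.Nodup) : (pvBStep pos st c).1.items = st.1.items.map (pvG pos [c]) := by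
  rw [pvBStep_fst]
  exact pvARemove_items pos st.1 c hN

theorem pvBStep_mem_snd (pos : String) (st : PySem.Dict String (List String) × PySem.Set String)
    (c x : String) :
    (x ∈ (pvBStep pos st c).2 ↔ x ∈ st.2 ∨
      (x = c ∧ pos ∈ st.1.getD c [] ∧ ((st.1.getD c []).erase pos).length = 1)) := by
  unfold pvBStep
  by_cases hm : pos ∈ st.1.getD c []
  · simp only [hm, if_true, PySem.List.remove?_eq_some_erase _ _ hm, Option.getD_some]
    by_cases hl : ((st.1.getD c []).erase pos).length = 1
    · simp [hl, PySem.Set.mem_add]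
    · have hb : ((((st.1.getD c []).erase pos)).length == 1) = false := by simp [hl]
      rw [hb]
      simp [hl]
  · simp [hm]

theorem pvBStep_snd_nodup (pos : String) (st : PySem.Dict String (List String) × PySem.Set String)
    (c : String) (h : st.2.Nodup) : (pvBStep pos st c).2.Nodup := by
  unfold pvBStep
  by_cases hm : pos ∈ st.1.getD c []
  · simp only [hm, if_true]
    by_cases hl : ((((PySem.List.remove? (st.1.getD c []) pos).getD (st.1.getD c []))).length == 1) = true
    · simpa [hl] using PySem.Set.nodup_add st.2 c h
    · simpa [hl] using h
  · simpa [hm] using h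

-- fold characterisations
theorem pvAFold_items (pos : String) :
    ∀ (ks : List String) (d : PySem.Dict String (List String)), d.keys.Nodup → ks.Nodup →
      (ks.foldl (pvARemove pos) d).items = d.items.map (pvG pos ks) := by
  intro ks
  induction ks with
  | nil =>
    intro d _ _
    rw [List.foldl_nil]
    conv_lhs => rw [← List.map_id d.items]
    apply List.map_congr_left
    intro e _
    unfold pvG
    simp
  | cons c rest ih =>
    intro d hN hks
    rw [List.foldl_cons]
    have h1 : (pvARemove pos d c).items = d.items.map (pvG pos [c]) := pvARemove_items pos d c hN
    have hk1 : (pvARemove pos d c).keys = d.keys := pvKeys_map_pvG pos [c] d _ h1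
    rw [ih (pvARemove pos d c) (hk1 ▸ hN) ((List.nodup_cons.1 hks).2), h1, List.map_map,
        pvG_comp pos c rest ((List.nodup_cons.1 hks).1)]

theorem pvBFold_fst (pos : String) :
    ∀ (ks : List String) (st : PySem.Dict String (List String) × PySem.Set String),
      (ks.foldl (pvBStep pos) st).1 = ks.foldl (pvARemove pos) st.1 := by
  intro ks
  induction ks with
  | nil => intro st; rfl
  | cons c rest ih =>
    intro st
    rw [List.foldl_cons, List.foldl_cons, ih, pvBStep_fst]

theorem pvBFold_items (pos : String) :
    ∀ (ks : List String) (d : PySem.Dict String (List String)) (s : PySem.Set String),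
      d.keys.Nodup → ks.Nodup →
      ((ks.foldl (pvBStep pos) (d, s)).1).items = d.items.map (pvG pos ks) := by
  intro ks d s hN hks
  rw [pvBFold_fst]
  exact pvAFold_items pos ks d hN hks

theorem pvGetD_map_pvG (pos : String) (ks : List String)
    (d d' : PySem.Dict String (List String)) (h : d'.items = d.items.map (pvG pos ks)) (x : String) :
    d'.getD x [] =
      (if x ∈ ks ∧ pos ∈ d.getD x [] then (d.getD x []).erase pos else d.getD x []) := by
  have hg := pvGet?_map_pvG pos ks d d' h x
  rw [PySem.Dict.getD_eq_get?_getD, PySem.Dict.getD_eq_get?_getD, hg]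
  cases d.get? x with
  | none => simp
  | some v => simp

theorem pvBFold_mem_snd (pos : String) :
    ∀ (ks : List String) (d : PySem.Dict String (List String)) (s : PySem.Set String),
      d.keys.Nodup → ks.Nodup → ∀ x,
      (x ∈ (ks.foldl (pvBStep pos) (d, s)).2 ↔ x ∈ s ∨
        (x ∈ ks ∧ pos ∈ d.getD x [] ∧ ((d.getD x []).erase pos).length = 1)) := by
  intro ks
  induction ks with
  | nil => intro d s _ _ x; simp
  | cons c rest ih =>
    intro d s hN hks x
    rw [List.foldl_cons]
    have hstep : (pvBStep pos (d, s) c) = ((pvBStep pos (d, s) c).1, (pvBStep pos (d, s) c).2) := rfl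
    have h1 : (pvBStep pos (d, s) c).1.items = d.items.map (pvG pos [c]) := pvBStep_items pos (d, s) c hN
    have hk1 : (pvBStep pos (d, s) c).1.keys = d.keys := pvKeys_map_pvG pos [c] d _ h1
    rw [hstep, ih _ _ (hk1 ▸ hN) ((List.nodup_cons.1 hks).2) x]
    have hgd : ∀ y, y ≠ c → (pvBStep pos (d, s) c).1.getD y [] = d.getD y [] := by
      intro y hy
      rw [pvGetD_map_pvG pos [c] d _ h1 y]
      simp [hy]
    have hs1 := pvBStep_mem_snd pos (d, s) c x
    constructor
    · rintro (hx | ⟨hxr, hpos, hlen⟩)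
      · rcases hs1.1 hx with hx0 | ⟨hxc, h2, h3⟩
        · exact Or.inl hx0
        · exact Or.inr ⟨by simp [hxc], by rwa [hxc], by rwa [hxc]⟩
      · have hyc : x ≠ c := fun hh => (List.nodup_cons.1 hks).1 (hh ▸ hxr)
        rw [hgd x hyc] at hpos hlen
        exact Or.inr ⟨List.mem_cons_of_mem _ hxr, hpos, hlen⟩
    · rintro (hx | ⟨hxm, hpos, hlen⟩)
      · exact Or.inl (hs1.2 (Or.inl hx))
      · rcases List.mem_cons.1 hxm with hxc | hxr
        · exact Or.inl (hs1.2 (Or.inr ⟨hxc, by rwa [← hxc], by rwa [← hxc]⟩))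
        · have hyc : x ≠ c := fun hh => (List.nodup_cons.1 hks).1 (hh ▸ hxr)
          exact Or.inr ⟨hxr, by rwa [hgd x hyc], by rwa [hgd x hyc]⟩

theorem pvBFold_snd_nodup (pos : String) :
    ∀ (ks : List String) (st : PySem.Dict String (List String) × PySem.Set String),
      st.2.Nodup → ((ks.foldl (pvBStep pos) st).2).Nodup := by
  intro ks
  induction ks with
  | nil => intro st h; exact h
  | cons c rest ih =>
    intro st h
    rw [List.foldl_cons]
    exact ih _ (pvBStep_snd_nodup pos st c h)

-- erase
theorem pvErase_items (d : PySem.Dict String (List String)) (p : String) :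
    (d.erase p).items = d.items.filter (fun e => !(e.1 == p)) := rfl

theorem pvKeys_erase (d : PySem.Dict String (List String)) (p : String) :
    (d.erase p).keys = d.keys.filter (fun k => !(k == p)) := by
  unfold PySem.Dict.keys
  rw [pvErase_items, List.filter_map]
  rfl

theorem pvFind?_filter_ne (p x : String) (hx : x ≠ p) :
    ∀ (l : List (String × List String)),
      (l.filter (fun e => !(e.1 == p))).find? (fun e => e.1 == x) = l.find? (fun e => e.1 == x) := by
  intro l
  induction l with
  | nil => rfl
  | cons e rest ih =>
    rw [List.filter_cons]
    by_cases hep : e.1 = p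
    · have hnx : (e.1 == x) = false := by
        simp only [beq_eq_false_iff_ne, ne_eq, hep]
        intro hh
        exact hx hh.symm
      rw [if_neg (by simp [hep])]
      simp only [List.find?_cons, hnx]
      exact ih
    · rw [if_pos (by simp [hep])]
      cases hax : (e.1 == x) with
      | true => simp only [List.find?_cons, hax]
      | false =>
        simp only [List.find?_cons, hax]
        exact ih

theorem pvGet?_erase (d : PySem.Dict String (List String)) (p x : String) (hx : x ≠ p) :
    (d.erase p).get? x = d.get? x := by
  unfold PySem.Dict.get?
  rw [pvErase_items, pvFind?_filter_ne p x hx]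

-- A's scan = find?
theorem pvAScan_eq_find? :
    ∀ (L : List String) (d : PySem.Dict String (List String)) (nd : PySem.Dict String String),
      pvAScan d nd L =
        match L.find? (fun q => (d.getD q []).length == 1) with
        | none => (d, nd)
        | some p =>
          ((d.keys.foldl (pvARemove (PySem.List.pyGetD (d.getD p []) 0 "")) d).erase p,
           nd.insert p (PySem.List.pyGetD (d.getD p []) 0 "")) := by
  intro L
  induction L with
  | nil => intro d nd; rfl
  | cons p rest ih =>
    intro d nd
    by_cases hp : ((d.getD p []).length == 1) = true
    · unfold pvAScan
      rw [if_pos hp]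
      simp only [List.find?_cons, hp]
    · unfold pvAScan
      rw [if_neg hp]
      have hp' : ((d.getD p []).length == 1) = false := by simpa using hp
      simp only [List.find?_cons, hp']
      exact ih d nd

-- order dict characterisation
theorem pvOrdFold_get?_not_mem :
    ∀ (ks : List String) (s : Int) (od : PySem.Dict String Int) (x : String), x ∉ ks →
      ((PySem.List.enumerate ks s).foldl (fun od pr => od.insert pr.2 pr.1) od).get? x = od.get? x := by
  intro ks
  induction ks with
  | nil => intro s od x _; rfl
  | cons k rest ih =>
    intro s od x hx
    rw [PySem.List.enumerate_cons, List.foldl_cons]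
    rw [ih (s + 1) _ x (fun h => hx (List.mem_cons_of_mem _ h))]
    exact PySem.Dict.get?_insert_of_ne od _ (fun h => hx (h ▸ List.mem_cons_self))

theorem pvOrdFold_get?_getElem :
    ∀ (ks : List String) (s : Int) (od : PySem.Dict String Int), ks.Nodup →
      ∀ (i : Nat) (hi : i < ks.length),
      ((PySem.List.enumerate ks s).foldl (fun od pr => od.insert pr.2 pr.1) od).get? ks[i] =
        some (s + i) := by
  intro ks
  induction ks with
  | nil => intro s od _ i hi; simp at hi
  | cons k rest ih =>
    intro s od hks i hi
    rw [PySem.List.enumerate_cons, List.foldl_cons]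
    cases i with
    | zero =>
      simp only [List.getElem_cons_zero]
      rw [pvOrdFold_get?_not_mem rest (s + 1) _ k (List.nodup_cons.1 hks).1,
          PySem.Dict.get?_insert_self]
      norm_num
    | succ j =>
      simp only [List.getElem_cons_succ]
      rw [ih (s + 1) _ (List.nodup_cons.1 hks).2 j (by simpa using hi)]
      congr 1
      push_cast
      ring

theorem pvOrdD_getD (K : List String) (hK : K.Nodup) (i : Nat) (hi : i < K.length) :
    (pvOrdD K).getD K[i] 0 = (i : Int) := by
  unfold pvOrdD
  rw [PySem.Dict.getD_eq_get?_getD, pvOrdFold_get?_getElem K 0 _ hK i hi]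
  simp

theorem pvOrdD_pairwise (K : List String) (hK : K.Nodup) :
    K.Pairwise (fun a b => (pvOrdD K).getD a 0 < (pvOrdD K).getD b 0) := by
  rw [List.pairwise_iff_getElem]
  intro i j hi hj hij
  rw [pvOrdD_getD K hK i hi, pvOrdD_getD K hK j hj]
  exact_mod_cast hij

-- the minimal candidate is the first singleton in scan order
theorem pvFind_eq_min (d : PySem.Dict String (List String)) (ord : String → Int)
    (hpw : d.keys.Pairwise (fun a b => ord a < ord b)) (p : String) (hp : p ∈ d.keys)
    (hP : ((d.getD p []).length == 1) = true)
    (hmin : ∀ q ∈ d.keys, ((d.getD q []).length == 1) = true → ord p ≤ ord q) :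
    d.keys.find? (fun q => (d.getD q []).length == 1) = some p := by
  cases hf : d.keys.find? (fun q => (d.getD q []).length == 1) with
  | none =>
    exact absurd hP (List.find?_eq_none.1 hf p hp)
  | some q =>
    obtain ⟨hq, i, hi, hiq, hfirst⟩ := List.find?_eq_some_iff_getElem.1 hf
    obtain ⟨jp, hjp, hjpe⟩ := List.getElem_of_mem hp
    rcases Nat.lt_trichotomy i jp with hlt | heq | hgt
    · have hord : ord q < ord p := by
        have := List.pairwise_iff_getElem.1 hpw i jp hi hjp hlt
        rwa [hiq, hjpe] at this
      have hqm : q ∈ d.keys := hiq ▸ List.getElem_mem hi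
      exact absurd (hmin q hqm hq) (by omega)
    · subst heq
      rw [← hiq, hjpe]
    · have := hfirst jp hgt
      rw [hjpe] at this
      simp [hP] at this

-- fixpoint
theorem pvRound_fix (d : PySem.Dict String (List String)) (nd : PySem.Dict String String)
    (h : ∀ x ∈ d.keys, (d.getD x []).length ≠ 1) : pvRound (d, nd) = (d, nd) := by
  unfold pvRound
  rw [pvAScan_eq_find?]
  have : d.keys.find? (fun q => (d.getD q []).length == 1) = none :=
    List.find?_eq_none.2 (fun x hx => by simpa using h x hx)
  rw [this]

-- ===== the simulation =====
theorem pvSize_eq_keys_length (d : PySem.Dict String (List String)) :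
    d.size = d.keys.length := by
  unfold PySem.Dict.size PySem.Dict.keys
  simp

theorem pvGetD_erase (d : PySem.Dict String (List String)) (p x : String) (hx : x ≠ p) :
    (d.erase p).getD x [] = d.getD x [] := by
  rw [PySem.Dict.getD_eq_get?_getD, PySem.Dict.getD_eq_get?_getD, pvGet?_erase d p x hx]

theorem pvBLoop_none (order : PySem.Dict String Int) (d : PySem.Dict String (List String))
    (cand : PySem.Set String) (res : PySem.Dict String String)
    (h : PySem.List.min? cand (fun p => order.getD p 0) = none) :
    pvBLoop order d cand res = res := by
  rw [pvBLoop]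
  split
  · rfl
  · rename_i p hp
    rw [h] at hp
    exact absurd hp (by simp)

theorem pvBLoop_stale (order : PySem.Dict String Int) (d : PySem.Dict String (List String))
    (cand : PySem.Set String) (res : PySem.Dict String String) (p : String)
    (h : PySem.List.min? cand (fun p => order.getD p 0) = some p)
    (hl : (d.getD p []).length ≠ 1) :
    pvBLoop order d cand res = pvBLoop order d ((PySem.Set.remove? cand p).getD cand) res := by
  rw [pvBLoop]
  split
  · rename_i hp
    rw [h] at hp
    exact absurd hp (by simp)
  · rename_i q hq
    rw [h] at hq
    injection hq with hq
    subst hq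
    rw [dif_pos hl]

theorem pvBLoop_proc (order : PySem.Dict String Int) (d : PySem.Dict String (List String))
    (cand : PySem.Set String) (res : PySem.Dict String String) (p : String)
    (h : PySem.List.min? cand (fun p => order.getD p 0) = some p)
    (hl : (d.getD p []).length = 1) :
    pvBLoop order d cand res =
      pvBLoop order
        (((d.erase p).keys.foldl (pvBStep (PySem.List.pyGetD (d.getD p []) 0 ""))
          (d.erase p, (PySem.Set.remove? cand p).getD cand)).1)
        (((d.erase p).keys.foldl (pvBStep (PySem.List.pyGetD (d.getD p []) 0 ""))
          (d.erase p, (PySem.Set.remove? cand p).getD cand)).2)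
        (res.insert p (PySem.List.pyGetD (d.getD p []) 0 "")) := by
  rw [pvBLoop]
  split
  · rename_i hp
    rw [h] at hp
    exact absurd hp (by simp)
  · rename_i q hq
    rw [h] at hq
    injection hq with hq
    subst hq
    rw [dif_neg (by omega)]

theorem pvSim (order : PySem.Dict String Int) :
    ∀ (d : PySem.Dict String (List String)) (cand : PySem.Set String) (res : PySem.Dict String String),
      (∃ K, K.Nodup ∧ order = pvOrdD K ∧ pvINV K d cand) →
      ∀ k, d.size ≤ k → (pvRound^[k] (d, res)).2 = pvBLoop order d cand res := by
  intro d cand res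
  induction d, cand, res using pvBLoop.induct order with
  | case1 d cand res hmin =>
    rintro ⟨K, hK, horder, hN, hsub, hcN, hinv2, hinv3⟩ k hk
    have hcand : cand = [] := (PySem.List.min?_eq_none_iff cand _).1 hmin
    rw [pvBLoop_none order d cand res hmin]
    have hfix : pvRound (d, res) = (d, res) := by
      apply pvRound_fix
      intro x hx hlen
      have := hinv3 x hx hlen
      rw [hcand] at this
      exact absurd this (List.not_mem_nil)
    rw [Function.iterate_fixed hfix k]
  | case2 d cand res p hmin cand1 hlen ih =>
    rintro ⟨K, hK, horder, hN, hsub, hcN, hinv2, hinv3⟩ k hk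
    have hp : p ∈ cand := PySem.List.min?_mem hmin
    have hrem : (PySem.Set.remove? cand p) = some (PySem.Set.discard cand p) := by
      unfold PySem.Set.remove?
      rw [if_pos ((PySem.Set.contains_iff cand p).2 hp)]
    have hc1 : cand1 = PySem.Set.discard cand p := by
      rw [show cand1 = (PySem.Set.remove? cand p).getD cand from rfl, hrem, Option.getD_some]
    rw [pvBLoop_stale order d cand res p hmin hlen]
    exact ih ⟨K, hK, horder, hN, hsub,
      (by rw [hc1]; exact PySem.Set.nodup_discard cand p hcN),
      (by
        intro x hx
        rw [hc1] at hx
        exact hinv2 x ((PySem.Set.mem_discard cand p x).1 hx).1),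
      (by
        intro x hx hl
        rw [hc1]
        refine (PySem.Set.mem_discard cand p x).2 ⟨hinv3 x hx hl, ?_⟩
        intro hxp
        rw [hxp] at hl
        exact hlen hl)⟩ k hk
  | case3 d cand res p hmin cand1 hlen' pos rem1 st ih =>
    rintro ⟨K, hK, horder, hN, hsub, hcN, hinv2, hinv3⟩ k hk
    have hlen : (d.getD p []).length = 1 := not_not.1 hlen'
    have hp : p ∈ cand := PySem.List.min?_mem hmin
    have hpk : p ∈ d.keys := (hinv2 p hp).1
    have hrem : (PySem.Set.remove? cand p) = some (PySem.Set.discard cand p) := by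
      unfold PySem.Set.remove?
      rw [if_pos ((PySem.Set.contains_iff cand p).2 hp)]
    have hc1 : cand1 = PySem.Set.discard cand p := by
      rw [show cand1 = (PySem.Set.remove? cand p).getD cand from rfl, hrem, Option.getD_some]
    -- facts about rem1
    have hrem1_items : rem1.items = d.items.filter (fun e => !(e.1 == p)) := pvErase_items d p
    have hrem1_keys : rem1.keys = d.keys.filter (fun x => !(x == p)) := pvKeys_erase d p
    have hrem1_nodup : rem1.keys.Nodup := hrem1_keys ▸ hN.filter _
    have hrem1_getD : ∀ y, y ≠ p → rem1.getD y [] = d.getD y [] := fun y hy => pvGetD_erase d p y hy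
    -- fold characterisations
    have hst_items : st.1.items = rem1.items.map (pvG pos rem1.keys) :=
      pvBFold_items pos rem1.keys rem1 cand1 hrem1_nodup hrem1_nodup
    have hst_keys : st.1.keys = rem1.keys := pvKeys_map_pvG pos rem1.keys rem1 st.1 hst_items
    have hst_getD : ∀ x, st.1.getD x [] =
        (if x ∈ rem1.keys ∧ pos ∈ rem1.getD x [] then (rem1.getD x []).erase pos
         else rem1.getD x []) := fun x => pvGetD_map_pvG pos rem1.keys rem1 st.1 hst_items x
    have hst_snd : ∀ x, x ∈ st.2 ↔ x ∈ cand1 ∨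
        (x ∈ rem1.keys ∧ pos ∈ rem1.getD x [] ∧ ((rem1.getD x []).erase pos).length = 1) :=
      pvBFold_mem_snd pos rem1.keys rem1 cand1 hrem1_nodup hrem1_nodup
    have hsz : 0 < d.size := by
      rw [pvSize_eq_keys_length]
      exact List.length_pos_of_mem hpk
    cases k with
    | zero => omega
    | succ k' =>
    -- A's round processes exactly p
    have hfind : d.keys.find? (fun q => (d.getD q []).length == 1) = some p := by
      apply pvFind_eq_min d (fun q => order.getD q 0)
      · rw [horder]
        exact (pvOrdD_pairwise K hK).sublist hsub
      · exact hpk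
      · simp [hlen]
      · intro q hq hql
        exact PySem.List.min?_isMin hmin q (hinv3 q hq (by simpa using hql))
    have hround : pvRound (d, res) =
        ((d.keys.foldl (pvARemove pos) d).erase p, res.insert p pos) := by
      unfold pvRound
      rw [pvAScan_eq_find?]
      simp only [hfind]
      rfl
    -- the two successor states coincide
    have hstate : st.1 = (d.keys.foldl (pvARemove pos) d).erase p := by
      apply PySem.Dict.ext
      rw [hst_items, pvErase_items (d.keys.foldl (pvARemove pos) d) p,
          pvAFold_items pos d.keys d hN hN]
      have hcomp : (fun e : String × List String => !(e.1 == p)) ∘ (pvG pos d.keys) =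
          (fun e : String × List String => !(e.1 == p)) := by
        funext e
        simp [Function.comp, pvG_fst]
      rw [List.filter_map (l := d.items), hcomp, hrem1_items]
      apply List.map_congr_left
      intro e he
      have hep : e.1 ≠ p := by
        have := (List.mem_filter.1 he).2
        simpa using this
      have hek : e.1 ∈ d.keys := by
        have := (List.mem_filter.1 he).1
        exact List.mem_map.2 ⟨e, this, rfl⟩
      unfold pvG
      have hiff : (e.1 ∈ rem1.keys ∧ pos ∈ e.2) ↔ (e.1 ∈ d.keys ∧ pos ∈ e.2) := by
        rw [hrem1_keys]
        simp only [List.mem_filter]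
        constructor
        · rintro ⟨⟨h1, _⟩, h2⟩
          exact ⟨h1, h2⟩
        · rintro ⟨h1, h2⟩
          exact ⟨⟨h1, by simpa using hep⟩, h2⟩
      exact if_congr hiff rfl rfl
    -- invariant for the successor state
    have hinv' : pvINV K st.1 st.2 := by
      refine ⟨?_, ?_, ?_, ?_, ?_⟩
      · rw [hst_keys]
        exact hrem1_nodup
      · rw [hst_keys, hrem1_keys]
        exact List.Sublist.trans List.filter_sublist hsub
      · apply pvBFold_snd_nodup
        show cand1.Nodup
        rw [hc1]
        exact PySem.Set.nodup_discard cand p hcN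
      · intro x hx
        rcases (hst_snd x).1 hx with hx1 | ⟨hxk, hxpos, hxlen⟩
        · rw [hc1] at hx1
          obtain ⟨hxc, hxp⟩ := (PySem.Set.mem_discard cand p x).1 hx1
          obtain ⟨hxk0, hxl0⟩ := hinv2 x hxc
          have hxk : x ∈ rem1.keys := by
            rw [hrem1_keys]
            exact List.mem_filter.2 ⟨hxk0, by simpa using hxp⟩
          refine ⟨hst_keys ▸ hxk, ?_⟩
          rw [hst_getD x, hrem1_getD x hxp]
          split
          · rw [List.length_erase]
            split <;> omega
          · exact hxl0
        · refine ⟨hst_keys ▸ hxk, ?_⟩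
          rw [hst_getD x, if_pos ⟨hxk, hxpos⟩, hxlen]
      · intro x hx hxl
        rw [hst_keys] at hx
        have hxp : x ≠ p := by
          intro hh
          rw [hrem1_keys] at hx
          have := (List.mem_filter.1 hx).2
          simp [hh] at this
        rw [hst_getD x] at hxl
        rw [hst_snd x]
        by_cases hpos : pos ∈ rem1.getD x []
        · right
          rw [if_pos ⟨hx, hpos⟩] at hxl
          exact ⟨hx, hpos, hxl⟩
        · left
          rw [if_neg (by tauto)] at hxl
          rw [hrem1_getD x hxp] at hxl
          have hxk0 : x ∈ d.keys := by
            rw [hrem1_keys] at hx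
            exact (List.mem_filter.1 hx).1
          rw [hc1]
          exact (PySem.Set.mem_discard cand p x).2 ⟨hinv3 x hxk0 hxl, hxp⟩
    -- size bound for the recursive call
    have hsz' : st.1.size ≤ k' := by
      have h1 : st.1.size = rem1.size := pvBFold_size pos rem1.keys (rem1, cand1)
      have h2 : rem1.size < d.size :=
        pvErase_size_lt ((PySem.Dict.contains_iff_mem_keys d p).2 hpk)
      omega
    -- step the iterate and close with the IH
    rw [pvBLoop_proc order d cand res p hmin hlen,
        Function.iterate_succ_apply, hround, ← hstate]
    exact ih ⟨K, hK, horder, hinv'⟩ k' hsz'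

-- ===== assembly =====
theorem pvFoldConst {β γ : Type} (f : β → β) :
    ∀ (l : List γ) (a : β), l.foldl (fun st _ => f st) a = f^[l.length] a := by
  intro l
  induction l with
  | nil => intro a; rfl
  | cons x xs ih => intro a; rw [List.foldl_cons, ih, ← Function.iterate_succ_apply]; rfl

theorem pvAIter (l : List Int) (a : PySem.Dict String (List String) × PySem.Dict String String) :
    l.foldl (fun st _ => pvAScan st.1 st.2 st.1.keys) a = pvRound^[l.length] a :=
  pvFoldConst pvRound l a

theorem products_allergens_spec0 : ∀ (products : List (String × List String)),
    products_allergens products = products_allergens_alt products := by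
  intro products
  show ((PySem.List.pyRange 0 ((PySem.Dict.ofList products).size : Int) 1).foldl
      (fun st _ => pvAScan st.1 st.2 st.1.keys)
      (PySem.Dict.ofList products, PySem.Dict.empty)).2.items =
    (pvBLoop
      ((PySem.List.enumerate (PySem.Dict.ofList products).keys 0).foldl
        (fun od pr => od.insert pr.2 pr.1) PySem.Dict.empty)
      (PySem.Dict.ofList products)
      (PySem.Set.ofList
        (((PySem.Dict.ofList products).items.filter (fun kv => kv.2.length == 1)).map (·.1)))
      PySem.Dict.empty).items
  rw [pvAIter, PySem.List.length_pyRange_one]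
  have hlen : ((PySem.Dict.ofList products).size - 0 : Int).toNat = (PySem.Dict.ofList products).size := by
    simp
  rw [hlen]
  apply congrArg PySem.Dict.items
  have hN : (PySem.Dict.ofList products).keys.Nodup := by
    unfold PySem.Dict.ofList
    exact PySem.Dict.nodup_keys_update PySem.Dict.empty products (by simp)
  have hcand : ∀ x, x ∈ PySem.Set.ofList
      (((PySem.Dict.ofList products).items.filter (fun kv => kv.2.length == 1)).map (·.1)) ↔
      x ∈ (PySem.Dict.ofList products).keys ∧
        ((PySem.Dict.ofList products).getD x []).length = 1 := by
    intro x
    rw [PySem.Set.mem_ofList]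
    constructor
    · intro hx
      obtain ⟨e, he, hex⟩ := List.mem_map.1 hx
      obtain ⟨hei, hel⟩ := List.mem_filter.1 he
      have hgd : (PySem.Dict.ofList products).getD e.1 [] = e.2 :=
        pvGetD_eq_of_mem_items (by simpa using hei) hN
      subst hex
      exact ⟨List.mem_map.2 ⟨e, hei, rfl⟩, by rw [hgd]; simpa using hel⟩
    · rintro ⟨hxk, hxl⟩
      refine List.mem_map.2 ⟨(x, (PySem.Dict.ofList products).getD x []), ?_, rfl⟩
      exact List.mem_filter.2 ⟨pvMem_keys_getD hN hxk, by simpa using hxl⟩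
  apply pvSim
  · refine ⟨(PySem.Dict.ofList products).keys, hN, rfl, hN, List.Sublist.refl _, ?_, ?_, ?_⟩
    · exact PySem.Set.nodup_ofList _
    · intro x hx
      obtain ⟨h1, h2⟩ := (hcand x).1 hx
      exact ⟨h1, by omega⟩
    · intro x hx hl
      exact (hcand x).2 ⟨hx, hl⟩
  · exact Nat.le_refl _

-- ===== VERDICT (by name: the statement is the Claim_ definition above) =====
theorem products_allergens_spec : Claim_equal_products_allergens := by
  intro products _
  exact products_allergens_spec0 products
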